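-- pv_equiv track=rewrite | github.com/tantan31418/Splitogether | module/Debt_Simplification.py | minCashFlowRec
-- ===== SOURCE A (Python) =====
-- def getMin(arr):
--
-- 	minVal = list(arr.values())[0]
-- 	minKey = list(arr.keys())[0]
-- 	for i in arr:
-- 		if (arr[i] < minVal):
-- 			minVal = arr[i]
-- 			minKey = i
-- 	return minKey
--
-- def getMax(arr):
--
-- 	maxVal = list(arr.values())[0]
-- 	maxKey = list(arr.keys())[0]
-- 	for i in arr:
-- 		if (arr[i] > maxVal):
-- 			maxVal = arr[i]
-- 			maxKey = i
-- 	return maxKey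
--
-- def minOf2(x, y):
--
-- 	return x if x < y else y
--
-- def minCashFlowRec(amount,payment):
--
-- 	# Find the indexes of minimum
-- 	# and maximum values in amount[]
-- 	# amount[mxCredit] indicates the maximum
-- 	# amount to be given(or credited) to any person.
-- 	# And amount[mxDebit] indicates the maximum amount
-- 	# to be taken (or debited) from any person.
-- 	# So if there is a positive value in amount[],
-- 	# then there must be a negative value
-- 	mxCredit = getMax(amount)
-- 	mxDebit = getMin(amount)
--
-- 	# If both amounts are 0,
-- 	# then all amounts are settled
-- 	if (amount[mxCredit] == 0 or amount[mxDebit] == 0):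
-- 		return payment
--
-- 	# Find the minimum of two amounts
-- 	min = minOf2(-amount[mxDebit], amount[mxCredit])
-- 	payment.append([mxDebit, min, mxCredit])
--
-- 	amount[mxCredit] -= min
-- 	amount[mxDebit] += min
--
-- 	# Recur for the amount array. Note that
-- 	# it is guaranteed that the recursion
-- 	# would terminate as either amount[mxCredit]
-- 	# or amount[mxDebit] becomes 0
-- 	return minCashFlowRec(amount,payment)
-- ===== SOURCE B (Python) =====
-- # B: iterative settlement over positional key/value arrays extracted once,
-- # finding the max-credit and max-debit positions in a single combined pass
-- # per round (A recurses over the dict, materialising key/value lists and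
-- # scanning twice per call).  Appends to `payment` in place like A; does not
-- # mutate `amount` (A zeroes it out) -- equivalence is about the return value.
-- def minCashFlowRec(amount, payment):
--     keys = list(amount)
--     vals = [amount[k] for k in keys]
--     n = len(keys)
--     if n == 0:
--         return payment
--     while True:
--         mi = 0  # position of the first maximum value
--         ni = 0  # position of the first minimum value
--         for i in range(1, n):
--             if vals[i] > vals[mi]:
--                 mi = i
--             if vals[i] < vals[ni]:
--                 ni = i
--         credit = vals[mi]
--         debit = vals[ni]
--         if credit == 0 or debit == 0:
--             return payment
--         t = -debit if -debit < credit else credit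
--         payment.append([keys[ni], t, keys[mi]])
--         vals[mi] -= t
--         vals[ni] += t
-- ===== Notes on version B (the rewrite author's own statement) =====
-- stated objective: simpler
-- what changed: Replaces A's recursion over a dict (which materialises list(values)/list(keys) and runs two separate full scans per call) by a single iterative while-loop over positional key/value arrays extracted once, with one fused pass finding both the max-credit and max-debit positions per round.
import Mathlib
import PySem

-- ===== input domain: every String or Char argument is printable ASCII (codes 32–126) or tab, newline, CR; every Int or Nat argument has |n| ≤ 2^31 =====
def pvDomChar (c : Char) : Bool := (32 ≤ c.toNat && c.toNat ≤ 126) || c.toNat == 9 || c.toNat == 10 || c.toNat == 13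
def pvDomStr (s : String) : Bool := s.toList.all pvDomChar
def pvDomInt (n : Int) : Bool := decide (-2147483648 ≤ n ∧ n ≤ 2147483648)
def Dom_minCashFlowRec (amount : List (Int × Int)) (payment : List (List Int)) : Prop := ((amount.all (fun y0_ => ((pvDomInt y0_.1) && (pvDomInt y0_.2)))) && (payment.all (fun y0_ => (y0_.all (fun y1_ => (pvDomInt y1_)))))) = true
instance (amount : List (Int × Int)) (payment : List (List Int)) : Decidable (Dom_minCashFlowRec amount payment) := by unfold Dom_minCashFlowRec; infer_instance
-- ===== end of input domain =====

-- B replaces A's recursion over a dict (rebuilding key/value lists and scanning twice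
-- per call) by an iterative loop over positional arrays with one fused extrema scan
-- per round; equivalence is about the RETURN value (Python A zeroes out `amount` in
-- place, Python B does not; both append the transactions to `payment` in place).

-- ===== PORT A =====
def pvMinOf2 (x y : Int) : Int := if x < y then x else y

def pvGetMax (arr : PySem.Dict Int Int) : Int :=
  -- list(arr.values())[0] / list(arr.keys())[0] raise IndexError on an empty dict
  -- (excluded by Pre_); the default 0 of pyGetD is never reached inside Pre_.
  let maxVal := PySem.List.pyGetD arr.values 0 0
  let maxKey := PySem.List.pyGetD arr.keys 0 0
  (arr.keys.foldl (fun s i => if arr.getD i 0 > s.2 then (i, arr.getD i 0) else s)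
    (maxKey, maxVal)).1

def pvGetMin (arr : PySem.Dict Int Int) : Int :=
  let minVal := PySem.List.pyGetD arr.values 0 0
  let minKey := PySem.List.pyGetD arr.keys 0 0
  (arr.keys.foldl (fun s i => if arr.getD i 0 < s.2 then (i, arr.getD i 0) else s)
    (minKey, minVal)).1

-- A's recursion; the fuel only makes it total (on an all-equal-nonzero dict Python A
-- recurses forever, which Pre_ excludes; inside Pre_ at most `size` rounds happen,
-- so the fuel is never exhausted).
def pvGoA : Nat → PySem.Dict Int Int → List (List Int) → List (List Int)
  | 0, _, payment => payment
  | fuel + 1, amount, payment =>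
    let mxCredit := pvGetMax amount
    let mxDebit := pvGetMin amount
    if amount.getD mxCredit 0 = 0 ∨ amount.getD mxDebit 0 = 0 then payment
    else
      let mn := pvMinOf2 (-(amount.getD mxDebit 0)) (amount.getD mxCredit 0)
      let payment' := payment ++ [[mxDebit, mn, mxCredit]]
      let a1 := amount.insert mxCredit (amount.getD mxCredit 0 - mn)
      let a2 := a1.insert mxDebit (a1.getD mxDebit 0 + mn)
      pvGoA fuel a2 payment'

def minCashFlowRec (amount : List (Int × Int)) (payment : List (List Int)) : List (List Int) :=
  pvGoA (amount.length + 1) (PySem.Dict.ofList amount) payment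

-- ===== PORT B =====
-- the while-True loop of Source B; the fuel only makes it total (same bound as A's port).
def pvGoB : Nat → List Int → List Int → List (List Int) → List (List Int)
  | 0, _, _, payment => payment
  | fuel + 1, keys, vals, payment =>
    let p := (PySem.List.pyRange 1 (vals.length : Int) 1).foldl
      (fun s i =>
        (if PySem.List.pyGetD vals i 0 > PySem.List.pyGetD vals s.1 0 then i else s.1,
         if PySem.List.pyGetD vals i 0 < PySem.List.pyGetD vals s.2 0 then i else s.2))
      ((0 : Int), (0 : Int))
    let credit := PySem.List.pyGetD vals p.1 0
    let debit := PySem.List.pyGetD vals p.2 0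
    if credit = 0 ∨ debit = 0 then payment
    else
      let t := if -debit < credit then -debit else credit
      let payment' := payment ++ [[PySem.List.pyGetD keys p.2 0, t, PySem.List.pyGetD keys p.1 0]]
      let vals1 := PySem.List.pySetD vals p.1 (credit - t)
      let vals2 := PySem.List.pySetD vals1 p.2 (PySem.List.pyGetD vals1 p.2 0 + t)
      pvGoB fuel keys vals2 payment'

def minCashFlowRec_alt (amount : List (Int × Int)) (payment : List (List Int)) : List (List Int) :=
  let d := PySem.Dict.ofList amount
  let keys := d.keys                              -- keys = list(amount)
  let vals := keys.map (fun k => d.getD k 0)      -- vals = [amount[k] for k in keys]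
  if keys.length = 0 then payment
  else pvGoB (amount.length + 1) keys vals payment

-- ===== PRECONDITION & SPEC =====
-- Pre_ excludes exactly the inputs on which Python A raises: an empty amount dict
-- (IndexError on list(arr.values())[0]) and a dict whose values are all equal and
-- nonzero (the recursion never settles anything → RecursionError); A returns normally
-- on every other input.
def Pre_minCashFlowRec (amount : List (Int × Int)) (_payment : List (List Int)) : Prop :=
  amount ≠ [] ∧
  (((PySem.Dict.ofList amount).values.any
      (fun v => v ≠ (PySem.Dict.ofList amount).values.headD 0)) = true
   ∨ (PySem.Dict.ofList amount).values.headD 0 = 0)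
instance (amount : List (Int × Int)) (payment : List (List Int)) : Decidable (Pre_minCashFlowRec amount payment) := by unfold Pre_minCashFlowRec; infer_instance

def pvWitness_minCashFlowRec : (List (Int × Int)) × List (List Int) := ([(0, 5), (1, -5), (2, 0)], [])

def Spec_minCashFlowRec (amount : List (Int × Int)) (payment : List (List Int)) (out : List (List Int)) : Prop := out = minCashFlowRec_alt amount payment
instance (amount : List (Int × Int)) (payment : List (List Int)) (out : List (List Int)) : Decidable (Spec_minCashFlowRec amount payment out) := by unfold Spec_minCashFlowRec; infer_instance

-- ===== CLAIM (what is proved, stated in full; the proofs are below) =====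
def Claim_equal_minCashFlowRec : Prop := ∀ (amount : List (Int × Int)) (payment : List (List Int)), Dom_minCashFlowRec amount payment → Pre_minCashFlowRec amount payment → Spec_minCashFlowRec amount payment (minCashFlowRec amount payment)

-- ===== LEMMAS AND PROOFS =====


-- d.values has the same length as d.keys (both are maps over d.items).
lemma pv_len_values (d : PySem.Dict Int Int) : d.values.length = d.keys.length := by
  simp [PySem.Dict.keys, PySem.Dict.values]

-- Looking the i-th key up in the dict gives the i-th value (keys are unique).
lemma pv_lookup (d : PySem.Dict Int Int) (hnd : d.keys.Nodup) {i : Int}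
    (h0 : 0 ≤ i) (h1 : i < (d.keys.length : Int)) :
    d.getD (PySem.List.pyGetD d.keys i 0) 0 = PySem.List.pyGetD d.values i 0 := by
  have hlen : d.values.length = d.keys.length := pv_len_values d
  rw [PySem.List.pyGetD_eq_getElem _ _ h0 h1,
      PySem.List.pyGetD_eq_getElem _ _ h0 (by rw [hlen]; exact h1)]
  have hkk : d.keys[i.toNat] = (d.items[i.toNat]'(by simp [PySem.Dict.keys] at h1 ⊢; omega)).1 := by
    simp [PySem.Dict.keys]
  have hvv : d.values[i.toNat]'(by omega) = (d.items[i.toNat]'(by simp [PySem.Dict.values] at hlen h1 ⊢; omega)).2 := by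
    simp [PySem.Dict.values]
  rw [hkk, hvv]
  exact PySem.Dict.getD_of_mem_items d (by simp) hnd 0

-- With unique keys, rewriting every item whose key is the j-th key is a positional set.
lemma pv_map_update_eq_set (L : List (Int × Int)) (hnd : (L.map Prod.fst).Nodup)
    (j : Nat) (hj : j < L.length) (w : Int) :
    L.map (fun p => if (p.1 == (L[j]).1) = true then ((L[j]).1, w) else p)
      = L.set j ((L[j]).1, w) := by
  apply List.ext_getElem
  · simp
  · intro i hi hi2
    simp only [List.getElem_map, List.getElem_set]
    by_cases hij : i = j
    · subst hij; simp
    · have hiL : i < L.length := by simpa using hi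
      have hne : (L[i]'hiL).1 ≠ (L[j]).1 := by
        intro h
        have : (L.map Prod.fst)[i]'(by simpa using hi) = (L.map Prod.fst)[j]'(by simpa using hj) := by
          simpa using h
        exact hij ((List.Nodup.getElem_inj_iff hnd).mp this)
      simp [hne]
      intro h; exact absurd h.symm hij

-- Inserting at the i-th key rewrites the i-th item in place.
lemma pv_items_set (d : PySem.Dict Int Int) (hnd : d.keys.Nodup) {i : Int} (w : Int)
    (h0 : 0 ≤ i) (h1 : i < (d.keys.length : Int)) :
    (d.insert (PySem.List.pyGetD d.keys i 0) w).items
      = d.items.set i.toNat (PySem.List.pyGetD d.keys i 0, w) := by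
  have hi' : i.toNat < d.items.length := by simp [PySem.Dict.keys] at h1; omega
  have hkey : PySem.List.pyGetD d.keys i 0 = (d.items[i.toNat]'hi').1 := by
    rw [PySem.List.pyGetD_eq_getElem _ _ h0 h1]; simp [PySem.Dict.keys]
  have hmem : PySem.List.pyGetD d.keys i 0 ∈ d.keys := by
    rw [PySem.List.pyGetD_eq_getElem _ _ h0 h1]; exact List.getElem_mem _
  rw [PySem.Dict.items_insert_of_contains d w ((PySem.Dict.contains_iff_mem_keys d _).mpr hmem)]
  rw [hkey]
  exact pv_map_update_eq_set d.items (by simpa [PySem.Dict.keys] using hnd) i.toNat hi' w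

lemma pv_keys_set (d : PySem.Dict Int Int) (hnd : d.keys.Nodup) {i : Int} (w : Int)
    (h0 : 0 ≤ i) (h1 : i < (d.keys.length : Int)) :
    (d.insert (PySem.List.pyGetD d.keys i 0) w).keys = d.keys := by
  show (d.insert (PySem.List.pyGetD d.keys i 0) w).items.map (fun x => x.1) = d.keys
  rw [pv_items_set d hnd w h0 h1, List.map_set]
  show (d.keys).set i.toNat ((PySem.List.pyGetD d.keys i 0, w).1) = d.keys
  rw [PySem.List.pyGetD_eq_getElem _ _ h0 h1]
  exact List.set_getElem_self (by omega)

lemma pv_values_set (d : PySem.Dict Int Int) (hnd : d.keys.Nodup) {i : Int} (w : Int)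
    (h0 : 0 ≤ i) (h1 : i < (d.keys.length : Int)) :
    (d.insert (PySem.List.pyGetD d.keys i 0) w).values = PySem.List.pySetD d.values i w := by
  rw [PySem.List.pySetD_of_nonneg _ _ h0]
  show (d.insert (PySem.List.pyGetD d.keys i 0) w).items.map (fun x => x.2) = d.values.set i.toNat w
  rw [pv_items_set d hnd w h0 h1, List.map_set]
  rfl

lemma pv_scanMax (d : PySem.Dict Int Int) (hnd : d.keys.Nodup) :
    ∀ (m : Nat) (lo b : Int), 0 ≤ lo → lo + m = (d.keys.length : Int) →
      0 ≤ b → b < (d.keys.length : Int) →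
    ((PySem.List.pyRange lo (d.keys.length : Int) 1).foldl
        (fun s j => if d.getD (PySem.List.pyGetD d.keys j 0) 0 > s.2
          then (PySem.List.pyGetD d.keys j 0, d.getD (PySem.List.pyGetD d.keys j 0) 0) else s)
        (PySem.List.pyGetD d.keys b 0, PySem.List.pyGetD d.values b 0)
      = (PySem.List.pyGetD d.keys
           ((PySem.List.pyRange lo (d.keys.length : Int) 1).foldl
             (fun s i => if PySem.List.pyGetD d.values i 0 > PySem.List.pyGetD d.values s 0 then i else s) b) 0,
         PySem.List.pyGetD d.values
           ((PySem.List.pyRange lo (d.keys.length : Int) 1).foldl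
             (fun s i => if PySem.List.pyGetD d.values i 0 > PySem.List.pyGetD d.values s 0 then i else s) b) 0))
    ∧ 0 ≤ (PySem.List.pyRange lo (d.keys.length : Int) 1).foldl
             (fun s i => if PySem.List.pyGetD d.values i 0 > PySem.List.pyGetD d.values s 0 then i else s) b
    ∧ (PySem.List.pyRange lo (d.keys.length : Int) 1).foldl
             (fun s i => if PySem.List.pyGetD d.values i 0 > PySem.List.pyGetD d.values s 0 then i else s) b
        < (d.keys.length : Int) := by
  intro m
  induction m with
  | zero =>
    intro lo b hlo hm hb0 hb1
    rw [PySem.List.pyRange_one_eq_nil (by omega)]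
    exact ⟨rfl, hb0, hb1⟩
  | succ m ih =>
    intro lo b hlo hm hb0 hb1
    have hlt : lo < (d.keys.length : Int) := by push_cast at hm ⊢; omega
    rw [PySem.List.pyRange_one_cons hlt]
    simp only [List.foldl_cons]
    rw [pv_lookup d hnd hlo hlt]
    by_cases hc : PySem.List.pyGetD d.values lo 0 > PySem.List.pyGetD d.values b 0
    · rw [if_pos hc, if_pos hc]
      exact ih (lo + 1) lo (by omega) (by push_cast at hm ⊢; omega) hlo hlt
    · rw [if_neg hc, if_neg hc]
      exact ih (lo + 1) b (by omega) (by push_cast at hm ⊢; omega) hb0 hb1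

lemma pv_scanMin (d : PySem.Dict Int Int) (hnd : d.keys.Nodup) :
    ∀ (m : Nat) (lo b : Int), 0 ≤ lo → lo + m = (d.keys.length : Int) →
      0 ≤ b → b < (d.keys.length : Int) →
    ((PySem.List.pyRange lo (d.keys.length : Int) 1).foldl
        (fun s j => if d.getD (PySem.List.pyGetD d.keys j 0) 0 < s.2
          then (PySem.List.pyGetD d.keys j 0, d.getD (PySem.List.pyGetD d.keys j 0) 0) else s)
        (PySem.List.pyGetD d.keys b 0, PySem.List.pyGetD d.values b 0)
      = (PySem.List.pyGetD d.keys
           ((PySem.List.pyRange lo (d.keys.length : Int) 1).foldl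
             (fun s i => if PySem.List.pyGetD d.values i 0 < PySem.List.pyGetD d.values s 0 then i else s) b) 0,
         PySem.List.pyGetD d.values
           ((PySem.List.pyRange lo (d.keys.length : Int) 1).foldl
             (fun s i => if PySem.List.pyGetD d.values i 0 < PySem.List.pyGetD d.values s 0 then i else s) b) 0))
    ∧ 0 ≤ (PySem.List.pyRange lo (d.keys.length : Int) 1).foldl
             (fun s i => if PySem.List.pyGetD d.values i 0 < PySem.List.pyGetD d.values s 0 then i else s) b
    ∧ (PySem.List.pyRange lo (d.keys.length : Int) 1).foldl
             (fun s i => if PySem.List.pyGetD d.values i 0 < PySem.List.pyGetD d.values s 0 then i else s) b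
        < (d.keys.length : Int) := by
  intro m
  induction m with
  | zero =>
    intro lo b hlo hm hb0 hb1
    rw [PySem.List.pyRange_one_eq_nil (by omega)]
    exact ⟨rfl, hb0, hb1⟩
  | succ m ih =>
    intro lo b hlo hm hb0 hb1
    have hlt : lo < (d.keys.length : Int) := by push_cast at hm ⊢; omega
    rw [PySem.List.pyRange_one_cons hlt]
    simp only [List.foldl_cons]
    rw [pv_lookup d hnd hlo hlt]
    by_cases hc : PySem.List.pyGetD d.values lo 0 < PySem.List.pyGetD d.values b 0
    · rw [if_pos hc, if_pos hc]
      exact ih (lo + 1) lo (by omega) (by push_cast at hm ⊢; omega) hlo hlt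
    · rw [if_neg hc, if_neg hc]
      exact ih (lo + 1) b (by omega) (by push_cast at hm ⊢; omega) hb0 hb1

lemma pv_foldKeys (d : PySem.Dict Int Int) (f : Int × Int → Int → Int × Int) (init : Int × Int) :
    d.keys.foldl f init
      = (PySem.List.pyRange 0 (d.keys.length : Int) 1).foldl
          (fun s j => f s (PySem.List.pyGetD d.keys j 0)) init := by
  conv_lhs => rw [← PySem.List.map_pyGetD_pyRange_zero d.keys 0]
  rw [List.foldl_map]
  simp only [PySem.List.len_eq]

lemma pv_range_split (d : PySem.Dict Int Int) (hn : 0 < d.keys.length) :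
    PySem.List.pyRange 0 (d.keys.length : Int) 1
      = 0 :: PySem.List.pyRange 1 (d.keys.length : Int) 1 := by
  rw [PySem.List.pyRange_one_cons (by exact_mod_cast hn)]
  norm_num

lemma pv_getMax_eq (d : PySem.Dict Int Int) (hnd : d.keys.Nodup) (hn : 0 < d.keys.length) :
    pvGetMax d = PySem.List.pyGetD d.keys
      ((PySem.List.pyRange 1 (d.keys.length : Int) 1).foldl
        (fun s i => if PySem.List.pyGetD d.values i 0 > PySem.List.pyGetD d.values s 0 then i else s) 0) 0 := by
  have hnI : (0:Int) < (d.keys.length : Int) := by exact_mod_cast hn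
  simp only [pvGetMax]
  rw [pv_foldKeys, pv_range_split d hn]
  simp only [List.foldl_cons]
  rw [pv_lookup d hnd le_rfl hnI,
    if_neg (lt_irrefl (PySem.List.pyGetD d.values 0 0))]
  exact congrArg Prod.fst (pv_scanMax d hnd (d.keys.length - 1) 1 0 (by norm_num)
    (by omega) le_rfl hnI).1

lemma pv_getMin_eq (d : PySem.Dict Int Int) (hnd : d.keys.Nodup) (hn : 0 < d.keys.length) :
    pvGetMin d = PySem.List.pyGetD d.keys
      ((PySem.List.pyRange 1 (d.keys.length : Int) 1).foldl
        (fun s i => if PySem.List.pyGetD d.values i 0 < PySem.List.pyGetD d.values s 0 then i else s) 0) 0 := by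
  have hnI : (0:Int) < (d.keys.length : Int) := by exact_mod_cast hn
  simp only [pvGetMin]
  rw [pv_foldKeys, pv_range_split d hn]
  simp only [List.foldl_cons]
  rw [pv_lookup d hnd le_rfl hnI,
    if_neg (lt_irrefl (PySem.List.pyGetD d.values 0 0))]
  exact congrArg Prod.fst (pv_scanMin d hnd (d.keys.length - 1) 1 0 (by norm_num)
    (by omega) le_rfl hnI).1

theorem pv_go_eq : ∀ (fuel : Nat) (d : PySem.Dict Int Int) (payment : List (List Int)),
    d.keys.Nodup → pvGoA fuel d payment = pvGoB fuel d.keys d.values payment := by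
  intro fuel
  induction fuel with
  | zero => intro d payment _; rfl
  | succ fuel ih =>
    intro d payment hnd
    by_cases hn0 : d.keys.length = 0
    · have hk : d.keys = [] := List.eq_nil_of_length_eq_zero hn0
      have hv : d.values = [] := List.eq_nil_of_length_eq_zero (by rw [pv_len_values]; exact hn0)
      have hgd : d.getD 0 0 = 0 := by
        apply PySem.Dict.getD_of_not_contains
        by_contra hcon
        have := (PySem.Dict.contains_iff_mem_keys d 0).mp (by simpa using hcon)
        simp [hk] at this
      have e0 : PySem.List.pyGetD ([] : List Int) 0 0 = 0 := by decide
      simp only [pvGoA, pvGoB, pvGetMax, pvGetMin, hk, hv, List.foldl_nil, List.length_nil,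
        Nat.cast_zero, PySem.List.pyRange_one_eq_nil (by norm_num : (0:Int) ≤ 1), e0, hgd]
      simp
    · have hn : 0 < d.keys.length := Nat.pos_of_ne_zero hn0
      have hnI : (0:Int) < (d.keys.length : Int) := by exact_mod_cast hn
      obtain ⟨-, hM0, hM1⟩ := pv_scanMax d hnd (d.keys.length - 1) 1 0 (by norm_num)
        (by omega) le_rfl hnI
      obtain ⟨-, hN0, hN1⟩ := pv_scanMin d hnd (d.keys.length - 1) 1 0 (by norm_num)
        (by omega) le_rfl hnI
      simp only [pvGoA, pvGoB, pv_len_values d]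
      rw [pv_getMax_eq d hnd hn, pv_getMin_eq d hnd hn]
      rw [pv_lookup d hnd hM0 hM1, pv_lookup d hnd hN0 hN1]
      rw [PySem.List.foldl_prod_mk
        (fun s1 i => if PySem.List.pyGetD d.values i 0 > PySem.List.pyGetD d.values s1 0 then i else s1)
        (fun s2 i => if PySem.List.pyGetD d.values i 0 < PySem.List.pyGetD d.values s2 0 then i else s2)]
      set M := (PySem.List.pyRange 1 (d.keys.length : Int) 1).foldl
        (fun s i => if PySem.List.pyGetD d.values i 0 > PySem.List.pyGetD d.values s 0 then i else s) 0 with hM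
      set N := (PySem.List.pyRange 1 (d.keys.length : Int) 1).foldl
        (fun s i => if PySem.List.pyGetD d.values i 0 < PySem.List.pyGetD d.values s 0 then i else s) 0 with hN
      set vM := PySem.List.pyGetD d.values M 0 with hvM
      set vN := PySem.List.pyGetD d.values N 0 with hvN
      by_cases hguard : (vM = 0 ∨ vN = 0)
      · rw [if_pos hguard, if_pos hguard]
      · rw [if_neg hguard, if_neg hguard]
        simp only [pvMinOf2]
        set t := if -vN < vM then -vN else vM with ht
        set k1 := PySem.List.pyGetD d.keys M 0 with hk1
        set k2 := PySem.List.pyGetD d.keys N 0 with hk2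
        set a1 := d.insert k1 (vM - t) with ha1
        have ha1k : a1.keys = d.keys := pv_keys_set d hnd _ hM0 hM1
        have ha1v : a1.values = PySem.List.pySetD d.values M (vM - t) := pv_values_set d hnd _ hM0 hM1
        have hnd1 : a1.keys.Nodup := by rw [ha1k]; exact hnd
        have hN1' : N < (a1.keys.length : Int) := by rw [ha1k]; exact hN1
        have hlk2 : a1.getD k2 0 = PySem.List.pyGetD a1.values N 0 := by
          have h := pv_lookup a1 hnd1 hN0 hN1'
          rw [ha1k, ← hk2] at h
          exact h
        rw [hlk2, ha1v]
        have h2k : ∀ w, (a1.insert k2 w).keys = d.keys := by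
          intro w
          have h := pv_keys_set a1 hnd1 w hN0 hN1'
          rwa [ha1k, ← hk2] at h
        have h2v : ∀ w, (a1.insert k2 w).values = PySem.List.pySetD a1.values N w := by
          intro w
          have h := pv_values_set a1 hnd1 w hN0 hN1'
          rwa [ha1k, ← hk2] at h
        refine (ih _ _ ?_).trans ?_
        · rw [h2k]; exact hnd
        · rw [h2k, h2v, ha1v]

-- ===== VERDICT (by name: the statement is the Claim_ definition above) =====
theorem minCashFlowRec_spec : Claim_equal_minCashFlowRec := by
  intro amount payment _ _
  unfold Spec_minCashFlowRec
  have hnd := PySem.Dict.nodup_keys_ofList (ν := Int) amount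
  simp only [minCashFlowRec, minCashFlowRec_alt]
  rw [pv_go_eq (amount.length + 1) _ payment hnd,
      ← PySem.Dict.values_eq_map_keys _ hnd 0]
  by_cases h0 : (PySem.Dict.ofList amount).keys.length = 0
  · rw [if_pos h0]
    have hk : (PySem.Dict.ofList amount).keys = [] := List.eq_nil_of_length_eq_zero h0
    have hv : (PySem.Dict.ofList amount).values = [] :=
      List.eq_nil_of_length_eq_zero (by rw [pv_len_values]; exact h0)
    have e0 : PySem.List.pyGetD ([] : List Int) 0 0 = 0 := by decide
    rw [hk, hv]
    simp only [pvGoB, List.length_nil, Nat.cast_zero,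
      PySem.List.pyRange_one_eq_nil (by norm_num : (0:Int) ≤ 1), List.foldl_nil, e0]
    simp
  · rw [if_neg h0]
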